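-- pv_equiv track=rewrite | github.com/bmakersspace/measure-magician | main.py | group_staff_lines
-- ===== SOURCE A (Python) =====
-- def group_staff_lines(staff_lines, lines_per_system=5, max_line_spacing=50, min_lines_per_system=3):
--     systems = []
--     staff_lines = sorted(staff_lines)
--     temp_group = [staff_lines[0]]
--     for line in staff_lines[1:]:
--         if line - temp_group[-1] <= max_line_spacing:
--             temp_group.append(line)
--         else:
--             if len(temp_group) >= min_lines_per_system:
--                 systems.append((temp_group[0] - 35, temp_group[-1] + 35))
--             temp_group = [line]
--     if len(temp_group) >= min_lines_per_system:
--         systems.append((temp_group[0] - 35, temp_group[-1] + 35))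
--     return systems
-- ===== SOURCE B (Python) =====
-- def _runs(xs, max_line_spacing):
--     runs = []
--     while xs:
--         i = 1
--         while i < len(xs) and xs[i] - xs[i - 1] <= max_line_spacing:
--             i += 1
--         runs.append(xs[:i])
--         xs = xs[i:]
--     return runs
--
--
-- def group_staff_lines(staff_lines, lines_per_system=5, max_line_spacing=50, min_lines_per_system=3):
--     runs = _runs(sorted(staff_lines), max_line_spacing)
--     return [(r[0] - 35, r[-1] + 35) for r in runs if len(r) >= min_lines_per_system]
-- ===== Notes on version B (the rewrite author's own statement) =====
-- stated objective: alternative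
-- what changed: Replaces A's single scan that maintains a temp group and emits systems inline with a two-phase decomposition: first split the sorted list into maximal runs with consecutive gaps <= max_line_spacing, then a separate comprehension filters runs by min size and maps each to (first-35, last+35).
import Mathlib
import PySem

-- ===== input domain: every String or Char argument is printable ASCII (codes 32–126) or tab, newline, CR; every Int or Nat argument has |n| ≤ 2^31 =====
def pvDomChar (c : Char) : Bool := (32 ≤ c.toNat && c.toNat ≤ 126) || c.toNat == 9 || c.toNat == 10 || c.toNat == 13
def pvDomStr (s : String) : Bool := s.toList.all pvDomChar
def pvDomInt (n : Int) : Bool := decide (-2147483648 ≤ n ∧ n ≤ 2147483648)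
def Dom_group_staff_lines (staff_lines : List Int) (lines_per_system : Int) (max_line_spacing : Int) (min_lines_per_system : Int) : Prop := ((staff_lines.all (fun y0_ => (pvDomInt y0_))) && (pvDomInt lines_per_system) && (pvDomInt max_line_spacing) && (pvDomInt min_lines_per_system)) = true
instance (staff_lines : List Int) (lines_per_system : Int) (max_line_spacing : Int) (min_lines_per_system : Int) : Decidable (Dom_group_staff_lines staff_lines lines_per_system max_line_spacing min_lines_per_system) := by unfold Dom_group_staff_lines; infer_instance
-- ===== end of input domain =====

-- B restructures A's inline scan into two phases (split sorted list into maximal runs, then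
-- filter/map the runs); same outputs; B returns [] where A raises IndexError (empty input).

-- ===== PORT A =====
-- temp[-1] with default (temp is always nonempty in A's loop)
def pyLastD (t : List Int) (d : Int) : Int := (PySem.List.pyGet? t (-1)).getD d

-- the for-loop of A: state = (temp_group, systems); trailing flush at []
def aLoop (maxsp minls : Int) : List Int → List (Int × Int) → List Int → List (Int × Int)
  | temp, sys, [] =>
      if minls ≤ (temp.length : Int) then sys ++ [(temp.headD 0 - 35, pyLastD temp 0 + 35)] else sys
  | temp, sys, line :: rest =>
      if line - pyLastD temp 0 ≤ maxsp then
        aLoop maxsp minls (temp ++ [line]) sys rest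
      else
        aLoop maxsp minls [line]
          (if minls ≤ (temp.length : Int) then sys ++ [(temp.headD 0 - 35, pyLastD temp 0 + 35)] else sys)
          rest

def group_staff_lines (staff_lines : List Int) (lines_per_system : Int) (max_line_spacing : Int) (min_lines_per_system : Int) : List (Int × Int) :=
  match PySem.List.sorted staff_lines (fun x => x) false with
  | [] => []  -- Python raises IndexError here (indexing the first element); excluded by Pre_
  | h :: t => aLoop max_line_spacing min_lines_per_system [h] [] t

-- ===== PORT B =====
-- inner while: extend the current run while the gap to the previous element is ≤ maxsp;
-- returns (rest of current run, remaining list)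
def altRun (maxsp : Int) : Int → List Int → List Int × List Int
  | _, [] => ([], [])
  | prev, x :: xs =>
      if x - prev ≤ maxsp then
        let p := altRun maxsp x xs
        (x :: p.1, p.2)
      else ([], x :: xs)

theorem altRun_snd_length_le (maxsp : Int) : ∀ (prev : Int) (xs : List Int),
    (altRun maxsp prev xs).2.length ≤ xs.length := by
  intro prev xs
  induction xs generalizing prev with
  | nil => simp [altRun]
  | cons x xs ih =>
      simp only [altRun]
      split
      · exact Nat.le_succ_of_le (ih x)
      · simp

-- outer while: split the list into maximal runs
def altRuns (maxsp : Int) : List Int → List (List Int)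
  | [] => []
  | x :: xs =>
      let p := altRun maxsp x xs
      (x :: p.1) :: altRuns maxsp p.2
termination_by xs => xs.length
decreasing_by
  exact Nat.lt_succ_of_le (altRun_snd_length_le maxsp x xs)

def group_staff_lines_alt (staff_lines : List Int) (lines_per_system : Int) (max_line_spacing : Int) (min_lines_per_system : Int) : List (Int × Int) :=
  ((altRuns max_line_spacing (PySem.List.sorted staff_lines (fun x => x) false)).filter
      (fun r => decide (min_lines_per_system ≤ (r.length : Int)))).map
    (fun r => (r.headD 0 - 35, pyLastD r 0 + 35))

-- ===== PRECONDITION & SPEC =====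
-- Pre_ excludes exactly the empty list, on which Python A raises IndexError (indexing the first element).
def Pre_group_staff_lines (staff_lines : List Int) (lines_per_system : Int) (max_line_spacing : Int) (min_lines_per_system : Int) : Prop := staff_lines ≠ []
instance (staff_lines : List Int) (lines_per_system : Int) (max_line_spacing : Int) (min_lines_per_system : Int) : Decidable (Pre_group_staff_lines staff_lines lines_per_system max_line_spacing min_lines_per_system) := by unfold Pre_group_staff_lines; infer_instance

def pvWitness_group_staff_lines : List Int × Int × Int × Int := ([10, 30, 200], 5, 50, 2)

def Spec_group_staff_lines (staff_lines : List Int) (lines_per_system : Int) (max_line_spacing : Int) (min_lines_per_system : Int) (out : List (Int × Int)) : Prop := out = group_staff_lines_alt staff_lines lines_per_system max_line_spacing min_lines_per_system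
instance (staff_lines : List Int) (lines_per_system : Int) (max_line_spacing : Int) (min_lines_per_system : Int) (out : List (Int × Int)) : Decidable (Spec_group_staff_lines staff_lines lines_per_system max_line_spacing min_lines_per_system out) := by unfold Spec_group_staff_lines; infer_instance

-- ===== CLAIM (what is proved, stated in full; the proofs are below) =====
def Claim_equal_group_staff_lines : Prop := ∀ (staff_lines : List Int) (lines_per_system : Int) (max_line_spacing : Int) (min_lines_per_system : Int), Dom_group_staff_lines staff_lines lines_per_system max_line_spacing min_lines_per_system → Pre_group_staff_lines staff_lines lines_per_system max_line_spacing min_lines_per_system → Spec_group_staff_lines staff_lines lines_per_system max_line_spacing min_lines_per_system (group_staff_lines staff_lines lines_per_system max_line_spacing min_lines_per_system)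

-- ===== LEMMAS AND PROOFS =====
theorem pyLastD_append_singleton (t : List Int) (x d : Int) : pyLastD (t ++ [x]) d = x := by
  simp [pyLastD, PySem.List.pyGet?_neg_one_append_singleton]

theorem pyLastD_singleton (x d : Int) : pyLastD [x] d = x := by
  simpa using pyLastD_append_singleton [] x d

-- core invariant: A's loop with a nonempty current group equals B's run decomposition,
-- where the in-progress group is glued onto the first run of the remainder
theorem aLoop_eq (maxsp minls : Int) :
    ∀ (rest temp : List Int) (sys : List (Int × Int)), temp ≠ [] →
    aLoop maxsp minls temp sys rest =
      sys ++ (((temp ++ (altRun maxsp (pyLastD temp 0) rest).1) ::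
               altRuns maxsp (altRun maxsp (pyLastD temp 0) rest).2).filter
          (fun r => decide (minls ≤ (r.length : Int)))).map
        (fun r => (r.headD 0 - 35, pyLastD r 0 + 35)) := by
  intro rest
  induction rest with
  | nil =>
      intro temp sys ht
      simp only [aLoop, altRun, altRuns, List.append_nil]
      rw [List.filter_cons]
      by_cases h : minls ≤ (temp.length : Int) <;> simp [h]
  | cons line rs ih =>
      intro temp sys ht
      by_cases h : line - pyLastD temp 0 ≤ maxsp
      · rw [show aLoop maxsp minls temp sys (line :: rs) =
              aLoop maxsp minls (temp ++ [line]) sys rs by simp [aLoop, h]]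
        rw [ih (temp ++ [line]) sys (by simp)]
        simp only [altRun, h, if_pos, pyLastD_append_singleton]
        simp [List.append_assoc]
      · rw [show aLoop maxsp minls temp sys (line :: rs) =
              aLoop maxsp minls [line]
                (if minls ≤ (temp.length : Int) then
                    sys ++ [(temp.headD 0 - 35, pyLastD temp 0 + 35)] else sys) rs by
              simp [aLoop, h]]
        rw [ih [line] _ (by simp)]
        simp only [altRun, h, if_neg, not_false_iff]
        rw [show altRuns maxsp (line :: rs) =
              (line :: (altRun maxsp line rs).1) :: altRuns maxsp (altRun maxsp line rs).2 from
              by rw [altRuns]]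
        rw [pyLastD_singleton]
        simp only [List.append_nil, List.singleton_append]
        rw [List.filter_cons (x := temp)]
        by_cases hlen : minls ≤ (temp.length : Int) <;> simp [hlen]

-- ===== VERDICT (by name: the statement is the Claim_ definition above) =====
theorem group_staff_lines_spec : Claim_equal_group_staff_lines := by
  intro staff_lines lps maxsp minls _hd hpre
  unfold Spec_group_staff_lines group_staff_lines group_staff_lines_alt
  cases hs : PySem.List.sorted staff_lines (fun x => x) false with
  | nil => exact absurd ((PySem.List.sorted_eq_nil_iff _ _ _).mp hs) hpre
  | cons h t =>
      show aLoop maxsp minls [h] [] t = _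
      rw [aLoop_eq maxsp minls t [h] [] (by simp)]
      rw [show altRuns maxsp (h :: t) =
            (h :: (altRun maxsp h t).1) :: altRuns maxsp (altRun maxsp h t).2 from by rw [altRuns]]
      rw [pyLastD_singleton]
      simp
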